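-- pv_equiv track=rewrite | github.com/andresculchac/MisionTic2022.py | FundamentalsUNacional/Modulo 8/multidigitos.py | isMultidigito
-- ===== SOURCE A (Python) =====
-- def isMultidigito(num):
--     multidigit = [1,2,3,4,5]
--     digitos = []
--     while num>0:
--         #primero sacamos el ultimo digito
--         digito = num%10
--         digitos.insert(0,digito)
--         num = num//10
--     for i in multidigit:
--         if i not in digitos:
--             return False
--     return True
-- ===== SOURCE B (Python) =====
-- def isMultidigito(num):
--     # Single pass with five boolean flags: no digit list is materialized and
--     # no membership scans are performed.
--     has1 = has2 = has3 = has4 = has5 = False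
--     while num > 0:
--         d = num % 10
--         has1 = has1 or d == 1
--         has2 = has2 or d == 2
--         has3 = has3 or d == 3
--         has4 = has4 or d == 4
--         has5 = has5 or d == 5
--         num = num // 10
--     return has1 and has2 and has3 and has4 and has5
-- ===== Notes on version B (the rewrite author's own statement) =====
-- stated objective: alternative
-- what changed: B replaces A's build-the-whole-digit-list-then-do-five-membership-scans structure with a single pass over the digits that maintains five boolean flags and never materializes a list.
import Mathlib
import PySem

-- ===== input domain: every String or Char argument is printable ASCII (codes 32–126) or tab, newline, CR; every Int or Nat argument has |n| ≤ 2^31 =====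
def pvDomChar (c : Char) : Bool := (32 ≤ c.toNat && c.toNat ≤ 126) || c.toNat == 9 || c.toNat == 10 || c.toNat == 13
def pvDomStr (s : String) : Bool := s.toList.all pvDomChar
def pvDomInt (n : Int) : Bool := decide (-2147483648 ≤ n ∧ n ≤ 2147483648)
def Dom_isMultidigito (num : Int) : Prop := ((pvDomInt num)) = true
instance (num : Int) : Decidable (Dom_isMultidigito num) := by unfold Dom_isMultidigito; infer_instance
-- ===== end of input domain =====

-- B makes one pass over the digits keeping five boolean flags instead of A's
-- digit list plus five membership scans (objective: alternative structure).

-- ===== PORT A =====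
-- while num>0: digito = num%10; digitos.insert(0,digito); num = num//10
def digitosLoop (num : Int) (digitos : List Int) : List Int :=
  if h : 0 < num then
    digitosLoop (PySem.Int.floordiv num 10) (PySem.Int.mod num 10 :: digitos)
  else digitos
termination_by num.toNat
decreasing_by
  have := PySem.Int.floordiv_eq_ediv_of_pos (a := num) (b := 10) (by omega)
  rw [this]; omega

-- for i in multidigit: if i not in digitos: return False / return True
def checkLoop (multidigit : List Int) (digitos : List Int) : Bool :=
  match multidigit with
  | [] => true
  | i :: rest => if ¬ (digitos.contains i) then false else checkLoop rest digitos

def isMultidigito (num : Int) : Bool :=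
  checkLoop [1, 2, 3, 4, 5] (digitosLoop num [])

-- ===== PORT B =====
def flagsLoop (num : Int) (h1 h2 h3 h4 h5 : Bool) : Bool × Bool × Bool × Bool × Bool :=
  if h : 0 < num then
    let d := PySem.Int.mod num 10
    flagsLoop (PySem.Int.floordiv num 10)
      (h1 || d == 1) (h2 || d == 2) (h3 || d == 3) (h4 || d == 4) (h5 || d == 5)
  else (h1, h2, h3, h4, h5)
termination_by num.toNat
decreasing_by
  have := PySem.Int.floordiv_eq_ediv_of_pos (a := num) (b := 10) (by omega)
  rw [this]; omega

def isMultidigito_alt (num : Int) : Bool :=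
  let f := flagsLoop num false false false false false
  f.1 && f.2.1 && f.2.2.1 && f.2.2.2.1 && f.2.2.2.2

-- ===== PRECONDITION & SPEC =====
def Spec_isMultidigito (num : Int) (out : Bool) : Prop := out = isMultidigito_alt num
instance (num : Int) (out : Bool) : Decidable (Spec_isMultidigito num out) := by unfold Spec_isMultidigito; infer_instance

-- ===== CLAIM (what is proved, stated in full; the proofs are below) =====
def Claim_equal_isMultidigito : Prop := ∀ (num : Int), Dom_isMultidigito num → Spec_isMultidigito num (isMultidigito num)

-- ===== LEMMAS AND PROOFS =====

theorem digitosLoop_pos {num : Int} (h : 0 < num) (acc : List Int) :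
    digitosLoop num acc =
      digitosLoop (PySem.Int.floordiv num 10) (PySem.Int.mod num 10 :: acc) := by
  rw [digitosLoop, dif_pos h]

theorem digitosLoop_nonpos {num : Int} (h : ¬ 0 < num) (acc : List Int) :
    digitosLoop num acc = acc := by
  rw [digitosLoop, dif_neg h]

theorem floordiv_ten_toNat_lt {num : Int} (h : 0 < num) :
    (PySem.Int.floordiv num 10).toNat < num.toNat := by
  rw [PySem.Int.floordiv_eq_ediv_of_pos (by omega)]
  omega

theorem digitosLoop_append (num : Int) :
    ∀ acc : List Int, digitosLoop num acc = digitosLoop num [] ++ acc := by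
  have key : ∀ n : Nat, ∀ num : Int, num.toNat = n →
      ∀ acc : List Int, digitosLoop num acc = digitosLoop num [] ++ acc := by
    intro n
    induction n using Nat.strong_induction_on with
    | _ n ih =>
      intro num hn acc
      by_cases h : 0 < num
      · have hlt := floordiv_ten_toNat_lt h
        rw [digitosLoop_pos h, digitosLoop_pos h ([]),
            ih _ (hn ▸ hlt) _ rfl (PySem.Int.mod num 10 :: acc),
            ih _ (hn ▸ hlt) _ rfl (PySem.Int.mod num 10 :: [])]
        simp
      · rw [digitosLoop_nonpos h, digitosLoop_nonpos h]
        simp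
  exact key num.toNat num rfl

theorem flagsLoop_or (num : Int) :
    ∀ h1 h2 h3 h4 h5 : Bool,
      flagsLoop num h1 h2 h3 h4 h5 =
        (h1 || (digitosLoop num []).contains 1,
         h2 || (digitosLoop num []).contains 2,
         h3 || (digitosLoop num []).contains 3,
         h4 || (digitosLoop num []).contains 4,
         h5 || (digitosLoop num []).contains 5) := by
  have key : ∀ n : Nat, ∀ num : Int, num.toNat = n →
      ∀ h1 h2 h3 h4 h5 : Bool,
        flagsLoop num h1 h2 h3 h4 h5 =
          (h1 || (digitosLoop num []).contains 1,
           h2 || (digitosLoop num []).contains 2,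
           h3 || (digitosLoop num []).contains 3,
           h4 || (digitosLoop num []).contains 4,
           h5 || (digitosLoop num []).contains 5) := by
    intro n
    induction n using Nat.strong_induction_on with
    | _ n ih =>
      intro num hn h1 h2 h3 h4 h5
      by_cases h : 0 < num
      · have hlt := floordiv_ten_toNat_lt h
        rw [flagsLoop, dif_pos h,
            ih _ (hn ▸ hlt) _ rfl,
            digitosLoop_pos h, digitosLoop_append _ [_]]
        simp only [List.contains_append, List.contains_cons, List.contains_nil,
          Bool.or_false, Prod.mk.injEq]
        refine ⟨?_, ?_, ?_, ?_, ?_⟩ <;>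
          · rw [Bool.eq_iff_iff]
            simp only [Bool.or_eq_true, beq_iff_eq, decide_eq_true_eq]
            tauto
      · rw [flagsLoop, dif_neg h, digitosLoop_nonpos h]
        simp
  exact key num.toNat num rfl

theorem ite_chain (a b c d e : Bool) :
    (if ¬ a then false else if ¬ b then false else if ¬ c then false
     else if ¬ d then false else if ¬ e then false else true)
    = (a && (b && (c && (d && e)))) := by
  revert a b c d e; decide

-- ===== VERDICT (by name: the statement is the Claim_ definition above) =====
theorem isMultidigito_spec : Claim_equal_isMultidigito := by
  intro num _
  unfold Spec_isMultidigito isMultidigito isMultidigito_alt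
  rw [flagsLoop_or]
  simp only [checkLoop]
  rw [ite_chain]
  simp only [Bool.false_or, Bool.and_assoc]
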